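-- pv_equiv track=rewrite | github.com/krishna-ji/timetable-engine | src/ga/core/population.py | _find_consecutive_block
-- ===== SOURCE A (Python) =====
-- def _find_consecutive_block(
--     free_quanta: list[int], block_size: int
-- ) -> list[int] | None:
--     """
--     Find a single consecutive block of specified size.
--     Returns None if not found.
--     """
--     if len(free_quanta) < block_size:
--         return None
--
--     sorted_free = sorted(free_quanta)
--
--     for i in range(len(sorted_free) - block_size + 1):
--         candidates = sorted_free[i : i + block_size]
--
--         # Check if truly consecutive
--         is_consecutive = all(
--             candidates[j] - candidates[j - 1] == 1 for j in range(1, len(candidates))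
--         )
--
--         if is_consecutive:
--             return candidates
--
--     return None
-- ===== SOURCE B (Python) =====
-- def _find_consecutive_block(free_quanta, block_size):
--     if block_size == 0:
--         return []
--     streak = 0
--     prev = None
--     for cur in sorted(free_quanta):
--         streak = streak + 1 if prev is not None and cur - prev == 1 else 1
--         if streak == block_size:
--             return list(range(cur - block_size + 1, cur + 1))
--         prev = cur
--     return None
-- ===== Notes on version B (the rewrite author's own statement) =====
-- stated objective: faster
-- what changed: Replaces the per-window slice-and-recheck scan over all window starts (rebuilding and testing each block of size block_size) with a single linear run-length pass over the sorted list that tracks the current consecutive streak and rebuilds the answer as a range.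
-- outside the precondition, e.g. on _find_consecutive_block([-5, -1, -4], -1): A returns [-5, -4], B returns None
import Mathlib
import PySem

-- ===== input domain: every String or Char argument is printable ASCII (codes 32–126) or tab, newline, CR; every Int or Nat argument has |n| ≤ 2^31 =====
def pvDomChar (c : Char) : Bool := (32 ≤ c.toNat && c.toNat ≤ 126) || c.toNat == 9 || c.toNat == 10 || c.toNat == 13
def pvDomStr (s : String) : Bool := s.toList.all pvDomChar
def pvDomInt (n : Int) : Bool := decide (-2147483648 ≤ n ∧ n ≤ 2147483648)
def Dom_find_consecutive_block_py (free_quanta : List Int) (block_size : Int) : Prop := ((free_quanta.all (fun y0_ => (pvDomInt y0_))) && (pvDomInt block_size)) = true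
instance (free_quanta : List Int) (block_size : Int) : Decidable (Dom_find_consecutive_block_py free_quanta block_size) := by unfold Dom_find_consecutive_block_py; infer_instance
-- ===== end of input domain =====

-- B replaces A's per-window slice-and-test scan with a single run-length pass over the
-- sorted list tracking the current consecutive streak (objective: faster).

-- ===== PORT A =====
-- all(candidates[j] - candidates[j-1] == 1 for j in range(1, len(candidates)));
-- the indices j, j-1 are always in range there, so pyGetD with a default is exact.
def pvIsConsec (c : List Int) : Bool :=
  (PySem.List.pyRange 1 (c.length : Int) 1).all
    (fun j => PySem.List.pyGetD c j 0 - PySem.List.pyGetD c (j - 1) 0 == 1)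

-- the 'for i in range(...)' loop with early return; Python's range is lazy, so the
-- loop is ported as recursion on the index i with the stop bound of the range
def pvALoop (s : List Int) (bs : Int) (i stop : Int) : Option (List Int) :=
  if i < stop then
    let cand := PySem.List.slice s (some i) (some (i + bs))
    if pvIsConsec cand then some cand else pvALoop s bs (i + 1) stop
  else none
termination_by (stop - i).toNat
decreasing_by omega

def find_consecutive_block_py (free_quanta : List Int) (block_size : Int) : Option (List Int) :=
  if (free_quanta.length : Int) < block_size then none
  else
    let sorted_free := PySem.List.sorted free_quanta (fun x => x) false
    pvALoop sorted_free block_size 0 ((sorted_free.length : Int) - block_size + 1)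

-- ===== PORT B =====
-- the 'for cur in sorted(free_quanta)' loop with early return
def pvBLoop (bs : Int) : List Int → Option Int → Int → Option (List Int)
  | [], _, _ => none
  | cur :: rest, prev, streak =>
    let streak' : Int :=
      if (match prev with | some p => cur - p == 1 | none => false) then streak + 1 else 1
    if streak' == bs then some (PySem.List.pyRange (cur - bs + 1) (cur + 1) 1)
    else pvBLoop bs rest (some cur) streak'

def find_consecutive_block_py_alt (free_quanta : List Int) (block_size : Int) : Option (List Int) :=
  if block_size == 0 then some []
  else pvBLoop block_size (PySem.List.sorted free_quanta (fun x => x) false) none 0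

-- ===== PRECONDITION & SPEC =====
-- Pre_ excludes negative block_size (outside the task's natural domain), where A's slice
-- sorted_free[i : i + block_size] silently becomes a negative-index slice and A returns an
-- accidental prefix of the sorted list.
def Pre_find_consecutive_block_py (_free_quanta : List Int) (block_size : Int) : Prop :=
  0 ≤ block_size
instance (free_quanta : List Int) (block_size : Int) : Decidable (Pre_find_consecutive_block_py free_quanta block_size) := by unfold Pre_find_consecutive_block_py; infer_instance

def pvWitness_find_consecutive_block_py : List Int × Int := ([3, 1, 2], 2)

def Spec_find_consecutive_block_py (free_quanta : List Int) (block_size : Int) (out : Option (List Int)) : Prop := out = find_consecutive_block_py_alt free_quanta block_size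
instance (free_quanta : List Int) (block_size : Int) (out : Option (List Int)) : Decidable (Spec_find_consecutive_block_py free_quanta block_size out) := by unfold Spec_find_consecutive_block_py; infer_instance

-- ===== CLAIM (what is proved, stated in full; the proofs are below) =====
def Claim_equal_find_consecutive_block_py : Prop := ∀ (free_quanta : List Int) (block_size : Int), Dom_find_consecutive_block_py free_quanta block_size → Pre_find_consecutive_block_py free_quanta block_size → Spec_find_consecutive_block_py free_quanta block_size (find_consecutive_block_py free_quanta block_size)

-- ===== LEMMAS AND PROOFS =====

-- proof-side mirror of pvALoop over the materialised range list
def pvALoopList (s : List Int) (bs : Int) : List Int → Option (List Int)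
  | [] => none
  | i :: rest =>
    let cand := PySem.List.slice s (some i) (some (i + bs))
    if pvIsConsec cand then some cand else pvALoopList s bs rest

theorem pvALoop_eq_list (s : List Int) (bs : Int) :
    ∀ (n : Nat) (i stop : Int), n = (stop - i).toNat →
      pvALoop s bs i stop = pvALoopList s bs (PySem.List.pyRange i stop 1) := by
  intro n
  induction n with
  | zero =>
    intro i stop hn
    rw [pvALoop, if_neg (by omega), PySem.List.pyRange_one_eq_nil (by omega)]
    rfl
  | succ n ih =>
    intro i stop hn
    rw [pvALoop, if_pos (by omega), PySem.List.pyRange_one_cons (by omega)]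
    simp only [pvALoopList]
    split
    · rfl
    · exact ih (i+1) stop (by omega)

-- length of the maximal consecutive (+1) run of s ending at index k
def pvRunAt (s : List Int) : Nat → Int
  | 0 => 1
  | k+1 => if s.getD (k+1) 0 - s.getD k 0 = 1 then pvRunAt s k + 1 else 1

theorem pvRunAt_pos (s : List Int) (k : Nat) : 1 ≤ pvRunAt s k := by
  induction k with
  | zero => simp [pvRunAt]
  | succ k ih => simp only [pvRunAt]; split <;> omega

theorem pvRunAt_le (s : List Int) (k : Nat) : pvRunAt s k ≤ (k : Int) + 1 := by
  induction k with
  | zero => simp [pvRunAt]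
  | succ k ih => simp only [pvRunAt]; push_cast; split <;> omega

theorem pvRunAt_succ_le (s : List Int) (k : Nat) : pvRunAt s (k+1) ≤ pvRunAt s k + 1 := by
  have := pvRunAt_pos s k
  simp only [pvRunAt]; split <;> omega

-- run-length ≥ m ↔ the last m entries step by +1
theorem pvRunAt_iff (s : List Int) (k : Nat) (m : Int) (h1 : 1 ≤ m) (h2 : m ≤ (k : Int) + 1) :
    m ≤ pvRunAt s k ↔
      (∀ j : Int, (k : Int) + 1 - m < j → j ≤ (k : Int) →
        s.getD j.toNat 0 - s.getD (j - 1).toNat 0 = 1) := by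
  induction k generalizing m with
  | zero =>
    have hm : m = 1 := by omega
    subst hm
    constructor
    · intro _ j hj1 hj2
      exact absurd hj2 (by omega)
    · intro _
      exact pvRunAt_pos s 0
  | succ k ih =>
    simp only [pvRunAt]
    by_cases hd : s.getD (k+1) 0 - s.getD k 0 = 1
    · rw [if_pos hd]
      by_cases hm1 : m = 1
      · subst hm1
        constructor
        · intro _ j hj1 hj2
          have hj : j = (k : Int) + 1 := by omega
          subst hj
          have : ((k:Int) + 1).toNat = k + 1 := by omega
          have h2' : ((k:Int) + 1 - 1).toNat = k := by omega
          rw [this, h2']; push_cast at hd ⊢; exact hd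
        · intro _; have := pvRunAt_pos s k; omega
      · have hm2 : 2 ≤ m := by omega
        have : m ≤ pvRunAt s k + 1 ↔ m - 1 ≤ pvRunAt s k := by omega
        rw [this, ih (m-1) (by omega) (by omega)]
        constructor
        · intro h j hj1 hj2
          by_cases hj : j ≤ (k : Int)
          · exact h j (by push_cast at hj1 ⊢; omega) hj
          · have hj' : j = (k : Int) + 1 := by push_cast at hj2; omega
            subst hj'
            have e1 : ((k:Int) + 1).toNat = k + 1 := by omega
            have e2 : ((k:Int) + 1 - 1).toNat = k := by omega
            rw [e1, e2]; exact hd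
        · intro h j hj1 hj2
          exact h j (by push_cast at hj1 ⊢; omega) (by push_cast; omega)
    · rw [if_neg hd]
      constructor
      · intro hm j hj1 hj2
        exact absurd hj2 (by push_cast at hj1 ⊢; omega)
      · intro h
        by_cases hm1 : m = 1
        · omega
        · exfalso
          apply hd
          have := h ((k:Int)+1) (by push_cast; omega) (by push_cast; omega)
          have e1 : ((k:Int) + 1).toNat = k + 1 := by omega
          have e2 : ((k:Int) + 1 - 1).toNat = k := by omega
          rw [e1, e2] at this; exact this

theorem pvIsConsec_iff (c : List Int) :
    pvIsConsec c = true ↔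
      (∀ j : Int, 1 ≤ j → j < (c.length : Int) →
        c.getD j.toNat 0 - c.getD (j-1).toNat 0 = 1) := by
  have e : ∀ i : Int, 0 ≤ i → PySem.List.pyGetD c i 0 = c.getD i.toNat 0 := by
    intro i hi
    rw [show i = ((i.toNat : Nat) : Int) by omega, PySem.List.pyGetD_natCast,
        Int.toNat_natCast]
  unfold pvIsConsec
  rw [List.all_eq_true]
  constructor
  · intro h j hj1 hj2
    have := h j (by rw [PySem.List.mem_pyRange_one]; omega)
    simp only [beq_iff_eq] at this
    rw [e j (by omega), e (j-1) (by omega)] at this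
    exact this
  · intro h j hj
    rw [PySem.List.mem_pyRange_one] at hj
    simp only [beq_iff_eq]
    rw [e j (by omega), e (j-1) (by omega)]
    exact h j hj.1 hj.2

-- A's window test, expressed through pvRunAt at the window's last index
theorem pvGood_iff (s : List Int) (bs i : Int) (hbs : 1 ≤ bs) (hi : 0 ≤ i)
    (hub : i + bs ≤ (s.length : Int)) :
    pvIsConsec (PySem.List.slice s (some i) (some (i + bs))) = true ↔
      bs ≤ pvRunAt s (i + bs - 1).toNat := by
  have hsl : PySem.List.slice s (some i) (some (i + bs)) =
      (s.drop i.toNat).take ((i+bs).toNat - i.toNat) :=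
    PySem.List.slice_toNat s hi (by omega)
  have hbn : (i+bs).toNat - i.toNat = bs.toNat := by omega
  rw [hbn] at hsl
  have hlen : ((s.drop i.toNat).take bs.toNat).length = bs.toNat := by
    simp; omega
  have hget : ∀ p : Nat, p < bs.toNat →
      ((s.drop i.toNat).take bs.toNat).getD p 0 = s.getD (i.toNat + p) 0 := by
    intro p hp
    rw [List.getD_eq_getElem _ _ (by omega), List.getD_eq_getElem _ _ (by omega)]
    simp
  rw [hsl, pvIsConsec_iff, pvRunAt_iff s _ bs hbs (by omega)]
  have hk : ((i + bs - 1).toNat : Int) = i + bs - 1 := by omega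
  rw [hk]
  constructor
  · intro h j hj1 hj2
    have := h (j - i) (by omega) (by rw [hlen]; omega)
    rw [hget _ (by omega), hget _ (by omega)] at this
    have e1 : i.toNat + (j - i).toNat = j.toNat := by omega
    have e2 : i.toNat + (j - i - 1).toNat = (j - 1).toNat := by omega
    rw [e1, e2] at this; exact this
  · intro h j hj1 hj2
    rw [hlen] at hj2
    rw [hget _ (by omega), hget _ (by omega)]
    have := h (i + j) (by omega) (by omega)
    have e1 : (i + j).toNat = i.toNat + j.toNat := by omega
    have e2 : (i + j - 1).toNat = i.toNat + (j - 1).toNat := by omega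
    rw [e1, e2] at this; exact this

-- a consecutive window ending at index t is the range ending at s[t]
theorem pvWindow_eq_range (s : List Int) (bs : Int) (t : Nat) (hbs : 1 ≤ bs)
    (ht : t < s.length) (hr : bs ≤ pvRunAt s t) :
    PySem.List.slice s (some ((t : Int) - bs + 1)) (some ((t : Int) - bs + 1 + bs)) =
      PySem.List.pyRange (s.getD t 0 - bs + 1) (s.getD t 0 + 1) 1 := by
  have hle : bs ≤ (t : Int) + 1 := le_trans hr (pvRunAt_le s t)
  have hi0 : (0:Int) ≤ (t : Int) - bs + 1 := by omega
  have hstep := (pvRunAt_iff s t bs hbs hle).mp hr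
  have hdown : ∀ d : Nat, (d : Int) ≤ bs - 1 → s.getD (t - d) 0 = s.getD t 0 - d := by
    intro d
    induction d with
    | zero => simp
    | succ d ih =>
      intro hd
      have hs := hstep ((t : Int) - d) (by omega) (by omega)
      have e1 : ((t : Int) - d).toNat = t - d := by omega
      have e2 : ((t : Int) - d - 1).toNat = t - (d + 1) := by omega
      rw [e1, e2] at hs
      have := ih (by omega)
      push_cast
      omega
  have hsl : PySem.List.slice s (some ((t:Int) - bs + 1)) (some ((t:Int) - bs + 1 + bs)) =
      (s.drop ((t:Int) - bs + 1).toNat).take bs.toNat := by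
    rw [PySem.List.slice_toNat s hi0 (by omega)]
    congr 1
    omega
  rw [hsl]
  apply List.ext_getElem
  · simp [PySem.List.length_pyRange_one]; omega
  · intro p hp1 hp2
    rw [PySem.List.getElem_pyRange_one]
    simp only [List.getElem_take, List.getElem_drop]
    have hb : ((t:Int) - bs + 1).toNat + p = t - (bs.toNat - 1 - p) := by
      simp at hp1; omega
    have hd := hdown (bs.toNat - 1 - p) (by simp at hp1; omega)
    rw [← List.getD_eq_getElem _ 0 (by simp at hp1 ⊢; omega), hb, hd]
    simp at hp1 ⊢
    omega

theorem pvBLoop_none (bs : Int) (l : List Int) (prev : Option Int) (streak : Int)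
    (h0 : 0 ≤ streak) (h : streak + (l.length : Int) < bs) :
    pvBLoop bs l prev streak = none := by
  induction l generalizing prev streak with
  | nil => rfl
  | cons cur rest ih =>
    simp only [pvBLoop]
    have hlen : ((cur :: rest).length : Int) = (rest.length : Int) + 1 := by simp
    rw [hlen] at h
    generalize hg : (if (match prev with | some p => cur - p == 1 | none => false) = true
        then streak + 1 else (1:Int)) = st'
    have hb : 1 ≤ st' ∧ st' ≤ streak + 1 := by
      rw [← hg]; split <;> omega
    rw [if_neg (by simp only [beq_iff_eq]; omega)]
    exact ih _ _ (by omega) (by omega)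

-- main alignment: B having processed t elements without a hit equals A's loop on the
-- remaining window starts
theorem pvMain (s : List Int) (bs : Int) (hbs : 1 ≤ bs) (hbn : bs ≤ (s.length : Int)) :
    ∀ (fuel t : Nat), fuel = s.length - t → t ≤ s.length →
    (∀ k, k < t → pvRunAt s k < bs) →
    pvBLoop bs (s.drop t) (if t = 0 then none else some (s.getD (t-1) 0))
      (if t = 0 then 0 else pvRunAt s (t-1))
    = pvALoopList s bs
        (PySem.List.pyRange (max 0 ((t : Int) - bs + 1)) ((s.length : Int) - bs + 1) 1) := by
  intro fuel
  induction fuel with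
  | zero =>
    intro t hf ht _
    have htl : t = s.length := by omega
    subst htl
    rw [List.drop_length]
    rw [max_eq_right (by omega), PySem.List.pyRange_one_eq_nil (by omega)]
    rfl
  | succ fuel ih =>
    intro t hf ht hnf
    have htl : t < s.length := by omega
    have hdrop : s.drop t = s.getD t 0 :: s.drop (t+1) := by
      rw [List.drop_eq_getElem_cons htl, List.getD_eq_getElem _ _ htl]
    rw [hdrop]
    simp only [pvBLoop]
    have hstreak' : (if (match (if t = 0 then none else some (s.getD (t-1) 0)) with
        | some p => s.getD t 0 - p == 1 | none => false) = true
        then (if t = 0 then 0 else pvRunAt s (t-1)) + 1 else (1:Int)) = pvRunAt s t := by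
      cases t with
      | zero => simp [pvRunAt]
      | succ k => simp only [pvRunAt, Nat.succ_ne_zero, if_false, Nat.add_sub_cancel,
          beq_iff_eq]
    rw [hstreak']
    by_cases hfire : pvRunAt s t = bs
    · rw [if_pos (by simp [hfire])]
      have hle : bs ≤ (t : Int) + 1 := hfire ▸ pvRunAt_le s t
      have hmax : max 0 ((t : Int) - bs + 1) = (t : Int) - bs + 1 := max_eq_right (by omega)
      conv_rhs => rw [hmax, PySem.List.pyRange_one_cons
        (show (t:Int) - bs + 1 < (s.length:Int) - bs + 1 by omega)]
      simp only [pvALoopList]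
      have hg : pvIsConsec (PySem.List.slice s (some ((t:Int) - bs + 1))
          (some ((t:Int) - bs + 1 + bs))) = true := by
        rw [pvGood_iff s bs _ hbs (by omega) (by omega)]
        have : ((t:Int) - bs + 1 + bs - 1).toNat = t := by omega
        rw [this]; omega
      rw [if_pos hg, pvWindow_eq_range s bs t hbs htl (le_of_eq hfire.symm)]
    · have hlt : pvRunAt s t < bs := by
        rcases Nat.eq_zero_or_pos t with h0 | hpos
        · subst h0; simp only [pvRunAt] at *; omega
        · obtain ⟨k, rfl⟩ : ∃ k, t = k + 1 := ⟨t - 1, by omega⟩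
          have h1 := pvRunAt_succ_le s k
          have h2 := hnf k (by omega)
          omega
      rw [if_neg (by simp [hfire])]
      have hrec := ih (t+1) (by omega) (by omega)
        (by intro k hk; rcases Nat.lt_succ_iff_lt_or_eq.mp hk with h | h
            · exact hnf k h
            · subst h; exact hlt)
      simp only [Nat.succ_ne_zero, if_false, Nat.add_sub_cancel] at hrec
      by_cases hc : (t : Int) + 1 < bs
      · rw [show max 0 (((t+1 : Nat) : Int) - bs + 1) = max 0 ((t:Int) - bs + 1) by
            rw [max_eq_left (by push_cast; omega), max_eq_left (by omega)]] at hrec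
        exact hrec
      · have hm : max 0 ((t:Int) - bs + 1) = (t:Int) - bs + 1 := max_eq_right (by omega)
        have hEq : max 0 (((t+1 : Nat) : Int) - bs + 1) = ((t:Int) - bs + 1) + 1 := by
          rw [max_eq_right (by push_cast; omega)]
          push_cast
          omega
        rw [hEq] at hrec
        have hg : pvIsConsec (PySem.List.slice s (some ((t:Int) - bs + 1))
            (some ((t:Int) - bs + 1 + bs))) = false := by
          rw [Bool.eq_false_iff]
          intro hcontra
          rw [pvGood_iff s bs _ hbs (by omega) (by omega)] at hcontra
          have he : ((t:Int) - bs + 1 + bs - 1).toNat = t := by omega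
          rw [he] at hcontra; omega
        rw [hm, PySem.List.pyRange_one_cons (show (t:Int) - bs + 1 < (s.length:Int) - bs + 1
              by omega)]
        simp only [pvALoopList]
        rw [hg]
        simp only [Bool.false_eq_true, if_false]
        exact hrec

theorem pv_final (free_quanta : List Int) (block_size : Int) (hpre : 0 ≤ block_size) :
    find_consecutive_block_py free_quanta block_size
      = find_consecutive_block_py_alt free_quanta block_size := by
  unfold find_consecutive_block_py find_consecutive_block_py_alt
  set s := PySem.List.sorted free_quanta (fun x => x) false with hs
  have hlen : s.length = free_quanta.length := PySem.List.length_sorted ..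
  by_cases hz : block_size = 0
  · subst hz
    rw [if_neg (by omega), if_pos (by simp)]
    show pvALoop s 0 0 ((s.length : Int) - 0 + 1) = some []
    rw [pvALoop_eq_list s 0 (((s.length : Int) - 0 + 1 - 0).toNat) 0 _ rfl]
    rw [PySem.List.pyRange_one_cons (by omega)]
    simp only [pvALoopList]
    have hc : PySem.List.slice s (some 0) (some (0 + 0)) = [] := by
      rw [PySem.List.slice_toNat s (by omega) (by omega)]
      simp
    rw [hc]
    have htr : pvIsConsec ([] : List Int) = true := by decide
    rw [htr, if_pos rfl]
  · have hbs : 1 ≤ block_size := by omega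
    by_cases hlt : (free_quanta.length : Int) < block_size
    · rw [if_pos hlt, if_neg (by simp [hz])]
      exact (pvBLoop_none block_size s none 0 (by omega) (by rw [hlen]; omega)).symm
    · rw [if_neg hlt, if_neg (by simp [hz])]
      show pvALoop s block_size 0 ((s.length : Int) - block_size + 1) = pvBLoop block_size s none 0
      rw [pvALoop_eq_list s block_size (((s.length : Int) - block_size + 1 - 0).toNat) 0 _ rfl]
      have := pvMain s block_size hbs (by rw [hlen]; omega) s.length 0 (by omega) (by omega)
        (by intro k hk; omega)
      simp only [List.drop_zero, Nat.cast_zero] at this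
      rw [max_eq_left (by omega)] at this
      exact this.symm

-- ===== VERDICT (by name: the statement is the Claim_ definition above) =====
theorem find_consecutive_block_py_spec : Claim_equal_find_consecutive_block_py := by
  intro free_quanta block_size _ hpre
  exact pv_final free_quanta block_size hpre
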